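-- pv_equiv track=rewrite | github.com/ratem/bart.dias | teste_profiler.py | nested_loops_varying_depth
-- ===== SOURCE A (Python) =====
-- def nested_loops_varying_depth(matrix):
--     """Nested loops with varying depths"""
--     result = 0
--     for i in range(len(matrix)):
--         for j in range(len(matrix[i])):
--             if i % 3 == 0:
--                 for k in range(min(10, j + 1)):
--                     result += matrix[i][j] * k
--             else:
--                 result += matrix[i][j]
--     return result
-- ===== SOURCE B (Python) =====
-- def nested_loops_varying_depth(matrix):
--     """Same sum, but the innermost k-loop is replaced by the triangular-number closed form."""
--     result = 0
--     for i, row in enumerate(matrix):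
--         if i % 3 == 0:
--             for j, v in enumerate(row):
--                 m = min(10, j + 1)
--                 result += v * (m * (m - 1) // 2)
--         else:
--             result += sum(row)
--     return result
-- ===== Notes on version B (the rewrite author's own statement) =====
-- stated objective: simpler
-- what changed: The innermost loop summing matrix[i][j]*k for k in range(min(10,j+1)) is replaced by the closed-form triangular number m*(m-1)//2, and the else-rows are summed with sum(row).
import Mathlib
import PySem

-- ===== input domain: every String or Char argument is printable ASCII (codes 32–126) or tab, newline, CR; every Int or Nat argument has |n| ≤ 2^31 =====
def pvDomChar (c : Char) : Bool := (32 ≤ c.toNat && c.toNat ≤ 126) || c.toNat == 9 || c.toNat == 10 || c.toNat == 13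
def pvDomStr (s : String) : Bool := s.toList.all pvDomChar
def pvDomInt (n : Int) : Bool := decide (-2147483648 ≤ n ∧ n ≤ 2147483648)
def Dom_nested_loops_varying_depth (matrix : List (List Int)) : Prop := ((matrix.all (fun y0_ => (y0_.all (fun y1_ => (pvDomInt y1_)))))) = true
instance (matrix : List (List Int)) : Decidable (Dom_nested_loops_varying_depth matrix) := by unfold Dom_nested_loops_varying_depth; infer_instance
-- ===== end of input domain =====

-- One honest line: B replaces the innermost k-loop by the triangular-number closed form
-- m*(m-1)//2 and sums non-multiple-of-3 rows with sum(row); exact for integer matrices.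

-- ===== PORT A =====
-- literal port of A: three nested index loops; all indices are in range, so getD is exact
def nested_loops_varying_depth (matrix : List (List Int)) : Int :=
  (List.range matrix.length).foldl (fun result i =>
    (List.range (matrix.getD i []).length).foldl (fun result j =>
      if i % 3 == 0 then
        (List.range (min 10 (j + 1))).foldl
          (fun (result : Int) (k : Nat) => result + (matrix.getD i []).getD j 0 * (k : Int)) result
      else
        result + (matrix.getD i []).getD j 0) result) 0

-- ===== PORT B =====
def nested_loops_varying_depth_alt (matrix : List (List Int)) : Int :=
  (PySem.List.enumerate matrix 0).foldl (fun result p =>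
    if p.1 % 3 == 0 then
      (PySem.List.enumerate p.2 0).foldl (fun result q =>
        let m : Int := min 10 (q.1 + 1)
        result + q.2 * PySem.Int.floordiv (m * (m - 1)) 2) result
    else
      result + p.2.sum) 0

-- ===== PRECONDITION & SPEC =====
def Spec_nested_loops_varying_depth (matrix : List (List Int)) (out : Int) : Prop := out = nested_loops_varying_depth_alt matrix
instance (matrix : List (List Int)) (out : Int) : Decidable (Spec_nested_loops_varying_depth matrix out) := by unfold Spec_nested_loops_varying_depth; infer_instance

-- ===== CLAIM (what is proved, stated in full; the proofs are below) =====
def Claim_equal_nested_loops_varying_depth : Prop := ∀ (matrix : List (List Int)), Dom_nested_loops_varying_depth matrix → Spec_nested_loops_varying_depth matrix (nested_loops_varying_depth matrix)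

-- ===== LEMMAS AND PROOFS =====

-- triangular number 0+1+...+(n-1), Nat division form
def pvTri (n : Nat) : Int := ((n * (n - 1) / 2 : Nat) : Int)

-- the intended value of row `row` sitting at row index `off`
def pvRowS (off : Nat) : List Int → Int
  | [] => 0
  | v :: t => v * pvTri (min 10 (off + 1)) + pvRowS (off + 1) t

-- the intended total for the tail of the matrix starting at row index `off`
def pvTotal (off : Nat) : List (List Int) → Int
  | [] => 0
  | row :: rest =>
      (if off % 3 = 0 then pvRowS 0 row else row.sum) + pvTotal (off + 1) rest

theorem pvTri_succ (n : Nat) : pvTri (n + 1) = pvTri n + n := by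
  unfold pvTri
  cases n with
  | zero => rfl
  | succ m =>
    have e : (m + 1 + 1) * (m + 1 + 1 - 1) = (m + 1) * (m + 1 - 1) + (m + 1) * 2 := by
      show (m + 2) * (m + 1) = (m + 1) * m + (m + 1) * 2
      ring
    have h : (m + 1 + 1) * (m + 1 + 1 - 1) / 2 = (m + 1) * (m + 1 - 1) / 2 + (m + 1) := by
      rw [e, Nat.add_mul_div_right _ _ (by norm_num : 0 < 2)]
    rw [h]; push_cast; ring

-- A's k-loop equals acc + v * pvTri n
theorem pvKFold (n : Nat) (v acc : Int) :
    (List.range n).foldl (fun (r : Int) (k : Nat) => r + v * (k : Int)) acc = acc + v * pvTri n := by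
  induction n generalizing acc with
  | zero => simp [pvTri]
  | succ m ih =>
    rw [List.range_succ, List.foldl_append, ih, pvTri_succ]
    simp; ring

-- values of B's floordiv coefficient agree with pvTri on the capped index
theorem pvCoef (off : Nat) :
    PySem.Int.floordiv (min 10 ((off : Int) + 1) * (min 10 ((off : Int) + 1) - 1)) 2
      = pvTri (min 10 (off + 1)) := by
  by_cases h : 9 ≤ off
  · have h1 : min 10 ((off : Int) + 1) = 10 := by omega
    have h2 : min 10 (off + 1) = 10 := by omega
    rw [h1, h2]; decide
  · interval_cases off <;> decide

-- A's j-loop (i % 3 == 0 branch) computes acc + pvRowS off row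
theorem pvAIf (row : List Int) (off : Nat) (acc : Int) :
    (List.range row.length).foldl
      (fun res j => (List.range (min 10 (j + off + 1))).foldl
        (fun (r : Int) (k : Nat) => r + row.getD j 0 * (k : Int)) res) acc
      = acc + pvRowS off row := by
  induction row generalizing off acc with
  | nil => simp [pvRowS]
  | cons v t ih =>
    rw [List.length_cons, List.range_succ_eq_map, List.foldl_cons, List.foldl_map]
    have step : (List.range (min 10 (0 + off + 1))).foldl
        (fun (r : Int) (k : Nat) => r + (v :: t).getD 0 0 * (k : Int)) acc
        = acc + v * pvTri (min 10 (off + 1)) := by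
      rw [pvKFold]; simp
    have congr1 : ∀ (a : Int),
        (List.range t.length).foldl
          (fun res j => (List.range (min 10 (j + 1 + off + 1))).foldl
            (fun (r : Int) (k : Nat) => r + (v :: t).getD (j + 1) 0 * (k : Int)) res) a
        = (List.range t.length).foldl
          (fun res j => (List.range (min 10 (j + (off + 1) + 1))).foldl
            (fun (r : Int) (k : Nat) => r + t.getD j 0 * (k : Int)) res) a := by
      intro a
      apply PySem.List.foldl_congr_mem
      intro b x _
      have : x + 1 + off + 1 = x + (off + 1) + 1 := by omega
      simp [this]
    have := congr1 ((List.range (min 10 (0 + off + 1))).foldl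
        (fun (r : Int) (k : Nat) => r + (v :: t).getD 0 0 * (k : Int)) acc)
    simp only [Nat.succ_eq_add_one] at *
    rw [this, ih (off + 1), step, pvRowS]
    ring

-- A's j-loop (else branch) computes acc + row.sum
theorem pvAElse (row : List Int) (acc : Int) :
    (List.range row.length).foldl (fun r j => r + row.getD j 0) acc = acc + row.sum := by
  induction row generalizing acc with
  | nil => simp
  | cons v t ih =>
    rw [List.length_cons, List.range_succ_eq_map, List.foldl_cons, List.foldl_map]
    have congr1 : ∀ (a : Int),
        (List.range t.length).foldl (fun r j => r + (v :: t).getD (j + 1) 0) a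
        = (List.range t.length).foldl (fun r j => r + t.getD j 0) a := by
      intro a; apply PySem.List.foldl_congr_mem; intro b x _; simp
    rw [congr1, ih]
    simp; ring

-- A's outer loop computes acc + pvTotal off matrix
theorem pvAOuter (matrix : List (List Int)) (off : Nat) (acc : Int) :
    (List.range matrix.length).foldl (fun result i =>
      (List.range (matrix.getD i []).length).foldl (fun result j =>
        if (i + off) % 3 == 0 then
          (List.range (min 10 (j + 1))).foldl
            (fun (result : Int) (k : Nat) => result + (matrix.getD i []).getD j 0 * (k : Int)) result
        else
          result + (matrix.getD i []).getD j 0) result) acc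
      = acc + pvTotal off matrix := by
  induction matrix generalizing off acc with
  | nil => simp [pvTotal]
  | cons row rest ih =>
    rw [List.length_cons, List.range_succ_eq_map, List.foldl_cons, List.foldl_map]
    have congr1 : ∀ (a : Int),
        (List.range rest.length).foldl (fun result i =>
          (List.range ((row :: rest).getD (i + 1) []).length).foldl (fun result j =>
            if (i + 1 + off) % 3 == 0 then
              (List.range (min 10 (j + 1))).foldl
                (fun (result : Int) (k : Nat) => result + ((row :: rest).getD (i + 1) []).getD j 0 * (k : Int)) result
            else
              result + ((row :: rest).getD (i + 1) []).getD j 0) result) a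
        = (List.range rest.length).foldl (fun result i =>
          (List.range (rest.getD i []).length).foldl (fun result j =>
            if (i + (off + 1)) % 3 == 0 then
              (List.range (min 10 (j + 1))).foldl
                (fun (result : Int) (k : Nat) => result + (rest.getD i []).getD j 0 * (k : Int)) result
            else
              result + (rest.getD i []).getD j 0) result) a := by
      intro a; apply PySem.List.foldl_congr_mem; intro b x _
      have : x + 1 + off = x + (off + 1) := by omega
      simp [this]
    have head : (List.range ((row :: rest).getD 0 []).length).foldl (fun result j =>
        if (0 + off) % 3 == 0 then
          (List.range (min 10 (j + 1))).foldl
            (fun (result : Int) (k : Nat) => result + ((row :: rest).getD 0 []).getD j 0 * (k : Int)) result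
        else
          result + ((row :: rest).getD 0 []).getD j 0) acc
        = acc + (if off % 3 = 0 then pvRowS 0 row else row.sum) := by
      simp only [List.getD_cons_zero, Nat.zero_add]
      by_cases h : off % 3 = 0
      · simp only [h, beq_self_eq_true, if_true]
        have := pvAIf row 0 acc
        simpa using this
      · have hb : (off % 3 == 0) = false := by simp [h]
        simp only [hb, Bool.false_eq_true, if_false, if_neg h]
        exact pvAElse row acc
    rw [congr1, ih (off + 1), head, pvTotal]
    ring

-- B's inner loop computes acc + pvRowS off row
theorem pvBInner (row : List Int) (off : Nat) (acc : Int) :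
    (PySem.List.enumerate row (off : Int)).foldl (fun result q =>
      let m : Int := min 10 (q.1 + 1)
      result + q.2 * PySem.Int.floordiv (m * (m - 1)) 2) acc
      = acc + pvRowS off row := by
  induction row generalizing off acc with
  | nil => simp [PySem.List.enumerate_nil, pvRowS]
  | cons v t ih =>
    rw [PySem.List.enumerate_cons, List.foldl_cons]
    have cast1 : (off : Int) + 1 = ((off + 1 : Nat) : Int) := by push_cast; ring
    rw [cast1, ih (off + 1)]
    simp only [pvRowS]
    have hc := pvCoef off
    push_cast
    rw [hc]
    ring

-- B's outer loop computes acc + pvTotal off matrix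
theorem pvBOuter (matrix : List (List Int)) (off : Nat) (acc : Int) :
    (PySem.List.enumerate matrix (off : Int)).foldl (fun result p =>
      if p.1 % 3 == 0 then
        (PySem.List.enumerate p.2 0).foldl (fun result q =>
          let m : Int := min 10 (q.1 + 1)
          result + q.2 * PySem.Int.floordiv (m * (m - 1)) 2) result
      else
        result + p.2.sum) acc
      = acc + pvTotal off matrix := by
  induction matrix generalizing off acc with
  | nil => simp [PySem.List.enumerate_nil, pvTotal]
  | cons row rest ih =>
    rw [PySem.List.enumerate_cons, List.foldl_cons]
    have cast1 : (off : Int) + 1 = ((off + 1 : Nat) : Int) := by push_cast; ring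
    rw [cast1, ih (off + 1)]
    have hmod : ((off : Int) % 3 == 0) = (off % 3 == 0) := by
      have : (off : Int) % 3 = ((off % 3 : Nat) : Int) := by push_cast; ring
      rw [this]
      by_cases h : off % 3 = 0
      · simp [h]
      · simp [h]
        omega
    simp only [hmod]
    by_cases h : off % 3 = 0
    · simp only [h, beq_self_eq_true, if_true]
      have := pvBInner row 0 acc
      simp only [Nat.cast_zero] at this
      rw [this, pvTotal, if_pos h]
      ring
    · have hb : (off % 3 == 0) = false := by simp [h]
      simp only [hb, Bool.false_eq_true, if_false]
      rw [pvTotal, if_neg h]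
      ring

-- ===== VERDICT (by name: the statement is the Claim_ definition above) =====
theorem nested_loops_varying_depth_spec : Claim_equal_nested_loops_varying_depth := by
  intro matrix _
  unfold Spec_nested_loops_varying_depth nested_loops_varying_depth nested_loops_varying_depth_alt
  have hA := pvAOuter matrix 0 0
  simp only [Nat.add_zero] at hA
  have hB := pvBOuter matrix 0 0
  simp only [Nat.cast_zero] at hB
  rw [hA, hB]
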